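-- pv_equiv track=rewrite | github.com/stbrumme/leetcode | 0793.py | preimageSizeFZF
-- ===== SOURCE A (Python) =====
-- def preimageSizeFZF(k: int) -> int:
--     # at zero at the end means that some numbers of the factorial have prime factor 5,
--     # some have prime factor 2 (2*5=10). 2 is far more frequent, so only the 5s "complete" a 10.
--     # f(x) = k means that there is exactly k times a 5
--     # unfortunately a number may have several 5s as prime facators, e.g. 50 = 2 * 5 * 5
--
--     # the result will either be 5 or 0:
--     # if x is a multiple of 5 then f(x) = f(x+1) = f(x+2) = f(x+3) = f(x+4)
--     # however if x is more than once a multiple of 5 then k jumps by more than 1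
--     # e.g. f(24) = 4 but f(25) = 6, there is no x such that f(x) = 5
--
--     # edge case
--     if k == 0:
--         return 5
--
--     # count trailing zeros of x
--     def tens(x):
--         result = 0
--         while x > 0:
--             x     //= 5
--             result += x
--         return result
--
--     left  = 0
--     right = 10 * k # rough estimate of upper bound
--     while left < right:
--         mid = (left + right) // 2
--         if tens(mid) < k:
--             left  = mid + 1
--         else:
--             right = mid
--
--     # exact match => 5 numbers
--     # not exact   => there's a jump and no f(x) = k
--     return 5 * (tens(left) == k)
-- ===== SOURCE B (Python) =====
-- def preimageSizeFZF(k: int) -> int: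
--     # Greedy decomposition of k over the place values b_i = (5^i - 1)/4
--     # (the trailing-zero counts of 5^i): f(x) = k is solvable exactly when
--     # k is a sum of these with every digit at most four, and then there are 5 such x.
--     if k < 0:
--         return 0
--     bases = []
--     b = 1
--     while b <= k:
--         bases.append(b)
--         b = 5 * b + 1
--     rem = k
--     for b in reversed(bases):
--         d, rem = divmod(rem, b)
--         if d > 4:
--             return 0
--     return 5 if rem == 0 else 0
-- ===== Notes on version B (the rewrite author's own statement) =====
-- stated objective: alternative
-- what changed: Replaces A's binary search (which repeatedly recomputes trailing-zero counts via an inner division loop) by a direct greedy digit decomposition of k over the place values (5^i-1)/4: k is a trailing-zero count iff every greedy digit is at most four.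
import Mathlib
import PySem

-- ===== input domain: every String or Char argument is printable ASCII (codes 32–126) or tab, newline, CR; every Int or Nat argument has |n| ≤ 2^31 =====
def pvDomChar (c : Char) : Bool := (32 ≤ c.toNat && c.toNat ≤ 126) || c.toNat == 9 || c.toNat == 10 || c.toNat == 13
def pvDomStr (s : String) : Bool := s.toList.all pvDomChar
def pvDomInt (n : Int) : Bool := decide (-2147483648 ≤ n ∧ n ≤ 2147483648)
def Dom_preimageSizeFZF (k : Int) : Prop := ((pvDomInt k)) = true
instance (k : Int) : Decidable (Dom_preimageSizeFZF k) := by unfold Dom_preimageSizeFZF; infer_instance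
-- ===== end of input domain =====

-- B replaces A's binary search (with its inner trailing-zero loop) by a greedy digit
-- decomposition of k over the place values (5^i-1)/4; objective: alternative algorithm.

-- ===== PORT A =====
-- termination measures for the ports, as named lemmas (cited by the decreasing_by clauses)
theorem pv_tens_dec (x : Int) (h : 0 < x) : (PySem.Int.floordiv x 5).toNat < x.toNat := by
  exact (Int.toNat_lt_toNat h).mpr
    ((PySem.Int.floordiv_lt_iff_lt_mul (by norm_num)).mpr (lt_mul_of_one_lt_right h (by norm_num)))

theorem pv_bs_dec1 (l r : Int) (h : l < r) :
    (r - (PySem.Int.floordiv (l + r) 2 + 1)).toNat < (r - l).toNat := by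
  have hmge : l ≤ PySem.Int.floordiv (l + r) 2 :=
    (PySem.Int.le_floordiv_iff_mul_le (by norm_num)).mpr ((mul_two l) ▸ add_le_add (le_refl l) h.le)
  exact (Int.toNat_lt_toNat (sub_pos.mpr h)).mpr
    (sub_lt_sub_left (Int.lt_add_one_iff.mpr hmge) r)

theorem pv_bs_dec2 (l r : Int) (h : l < r) :
    (PySem.Int.floordiv (l + r) 2 - l).toNat < (r - l).toNat := by
  have hmlt : PySem.Int.floordiv (l + r) 2 < r :=
    (PySem.Int.floordiv_lt_iff_lt_mul (by norm_num)).mpr ((mul_two r) ▸ add_lt_add_of_lt_of_le h (le_refl r))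
  exact (Int.toNat_lt_toNat (sub_pos.mpr h)).mpr (sub_lt_sub_right hmlt l)

theorem pv_bases_dec (k b : Int) (h : 1 ≤ b ∧ b ≤ k) :
    (k + 1 - (5 * b + 1)).toNat < (k + 1 - b).toNat := by
  have hb0 : 0 < k + 1 - b := sub_pos.mpr (lt_of_le_of_lt h.2 (lt_add_one k))
  have hb5 : b ≤ 5 * b := by
    calc b = 1 * b := (one_mul b).symm
      _ ≤ 5 * b := mul_le_mul_of_nonneg_right (by norm_num) (le_trans zero_le_one h.1)
  exact (Int.toNat_lt_toNat hb0).mpr (sub_lt_sub_left (lt_of_le_of_lt hb5 (lt_add_one _)) (k + 1))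

-- inner helper 'tens': while x > 0: x //= 5; result += x
def tensA (x : Int) : Int :=
  if _h : 0 < x then
    let x' := PySem.Int.floordiv x 5
    x' + tensA x'
  else 0
termination_by x.toNat
decreasing_by exact pv_tens_dec x _h

-- the 'while left < right' binary-search loop
def bsearchA (k left right : Int) : Int :=
  if _h : left < right then
    let mid := PySem.Int.floordiv (left + right) 2
    if tensA mid < k then bsearchA k (mid + 1) right
    else bsearchA k left mid
  else left
termination_by (right - left).toNat
decreasing_by
  · exact pv_bs_dec1 left right _h
  · exact pv_bs_dec2 left right _h

def preimageSizeFZF (k : Int) : Int :=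
  if k = 0 then 5
  else
    let left := bsearchA k 0 (10 * k)
    5 * (if tensA left = k then 1 else 0)

-- ===== PORT B =====
-- the 'while b <= k' loop building the ascending list of place values
-- ('1 ≤ b' is a totality guard only: b starts at 1 and only grows)
def basesB (k b : Int) : List Int :=
  if _h : 1 ≤ b ∧ b ≤ k then b :: basesB k (5 * b + 1) else []
termination_by (k + 1 - b).toNat
decreasing_by exact pv_bases_dec k b _h

-- the 'for b in reversed(bases)' loop: none = early 'return 0', some rem = final remainder
def greedyB (rem : Int) : List Int → Option Int
  | [] => some rem
  | b :: bs =>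
    if 4 < PySem.Int.floordiv rem b then none
    else greedyB (PySem.Int.mod rem b) bs

def preimageSizeFZF_alt (k : Int) : Int :=
  if k < 0 then 0
  else
    match greedyB k (basesB k 1).reverse with
    | none => 0
    | some rem => if rem = 0 then 5 else 0

-- ===== PRECONDITION & SPEC =====
def Spec_preimageSizeFZF (k : Int) (out : Int) : Prop := out = preimageSizeFZF_alt k
instance (k : Int) (out : Int) : Decidable (Spec_preimageSizeFZF k out) := by unfold Spec_preimageSizeFZF; infer_instance

-- ===== CLAIM (what is proved, stated in full; the proofs are below) =====
def Claim_equal_preimageSizeFZF : Prop := ∀ (k : Int), Dom_preimageSizeFZF k → Spec_preimageSizeFZF k (preimageSizeFZF k)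

-- ===== LEMMAS AND PROOFS =====

theorem tensA_nonpos {x : Int} (h : x ≤ 0) : tensA x = 0 := by
  rw [tensA]; simp [show ¬ (0 < x) by omega]

theorem tensA_eq' (x : Int) (h : 0 ≤ x) : tensA x = x / 5 + tensA (x / 5) := by
  rcases lt_or_eq_of_le h with hx | hx
  · rw [tensA]
    simp only [hx, ↓reduceDIte,
      PySem.Int.floordiv_eq_ediv_of_pos (show (0:Int) < 5 by norm_num)]
  · rw [← hx]; simp [tensA_nonpos]

theorem tensA_nonneg_aux (m : Nat) : ∀ x : Int, x.toNat ≤ m → 0 ≤ tensA x := by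
  induction m with
  | zero => intro x hx; rw [tensA_nonpos (by omega)]
  | succ m ih =>
    intro x hx
    rcases le_or_gt x 0 with h | h
    · rw [tensA_nonpos h]
    · rw [tensA_eq' x (by omega)]
      have h1 : 0 ≤ x / 5 := by omega
      have h2 : (x / 5).toNat ≤ m := by omega
      have := ih (x / 5) h2
      omega

theorem tensA_nonneg (x : Int) : 0 ≤ tensA x := tensA_nonneg_aux x.toNat x le_rfl

theorem tensA_mono_aux (m : Nat) : ∀ x y : Int, y.toNat ≤ m → x ≤ y → tensA x ≤ tensA y := by
  induction m with
  | zero =>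
    intro x y hy hxy
    rw [tensA_nonpos (by omega), tensA_nonpos (by omega)]
  | succ m ih =>
    intro x y hy hxy
    rcases le_or_gt y 0 with h | h
    · rw [tensA_nonpos (by omega), tensA_nonpos (by omega)]
    rcases le_or_gt x 0 with h' | h'
    · rw [tensA_nonpos h']; exact tensA_nonneg y
    rw [tensA_eq' x (by omega), tensA_eq' y (by omega)]
    have hdiv : x / 5 ≤ y / 5 := by omega
    have := ih (x / 5) (y / 5) (by omega) hdiv
    omega

theorem tensA_mono {x y : Int} (h : x ≤ y) : tensA x ≤ tensA y :=
  tensA_mono_aux y.toNat x y le_rfl h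

-- place values b_n = (5^n - 1)/4 = tensA (5^n)
def pvB : Nat → Int
  | 0 => 0
  | n + 1 => 5 ^ n + pvB n

theorem pvB_nonneg (n : Nat) : 0 ≤ pvB n := by
  induction n with
  | zero => simp [pvB]
  | succ n ih => simp only [pvB]; positivity

theorem pvB_succ (n : Nat) : pvB (n + 1) = 5 * pvB n + 1 := by
  induction n with
  | zero => simp [pvB]
  | succ n ih => simp only [pvB] at ih ⊢; rw [pow_succ]; omega

theorem pvB_pos (n : Nat) : 0 < pvB (n + 1) := by
  have := pvB_nonneg n; rw [pvB_succ]; omega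

theorem pvB_mono {m n : Nat} (h : m ≤ n) : pvB m ≤ pvB n := by
  induction h with
  | refl => exact le_refl _
  | @step p h ih =>
    have : (0:Int) < 5 ^ p := by positivity
    calc pvB m ≤ pvB p := ih
      _ ≤ pvB (p+1) := by simp only [pvB]; omega

theorem pvB_ge (n : Nat) : (n : Int) ≤ pvB n := by
  induction n with
  | zero => simp [pvB]
  | succ n ih =>
    have : (1:Int) ≤ 5 ^ n := one_le_pow₀ (by norm_num)
    simp only [pvB]; push_cast; omega

-- additivity: tensA (d * 5^n + x') = d * pvB n + tensA x' for a base-5 digit d and x' < 5^n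
theorem tensA_add (n : Nat) : ∀ d x' : Int, 0 ≤ d → d ≤ 4 → 0 ≤ x' → x' < 5 ^ n →
    tensA (d * 5 ^ n + x') = d * pvB n + tensA x' := by
  induction n with
  | zero =>
    intro d x' hd0 hd4 hx0 hxn
    have hx : x' = 0 := by omega
    subst hx
    simp only [pow_zero, mul_one, add_zero, pvB, mul_zero, zero_add]
    rw [tensA_eq' d hd0, show d / 5 = 0 by omega, tensA_nonpos le_rfl]
    ring
  | succ n ih =>
    intro d x' hd0 hd4 hx0 hxn
    have hpow : (0:Int) < 5 ^ n := by positivity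
    set A := d * 5 ^ n with hA
    have hsplit : d * 5 ^ (n+1) + x' = 5 * A + x' := by rw [hA, pow_succ]; ring
    have hq : (d * 5 ^ (n+1) + x') / 5 = A + x' / 5 := by omega
    have hx5 : x' / 5 < 5 ^ n := by omega
    rw [tensA_eq' _ (by nlinarith), hq, hA, ih d (x'/5) hd0 hd4 (by omega) hx5,
        tensA_eq' x' hx0, pvB]
    ring

theorem tensA_pow (n : Nat) : tensA (5 ^ n) = pvB n := by
  have h := tensA_add n 1 0 (by norm_num) (by norm_num) (by norm_num) (by positivity)
  simpa [tensA_nonpos] using h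

theorem tensA_bound (n : Nat) : ∀ x : Int, 0 ≤ x → x < 5 ^ (n + 1) →
    tensA x ≤ pvB (n + 1) - 1 := by
  induction n with
  | zero =>
    intro x hx0 hxn
    rw [tensA_eq' x hx0, show x / 5 = 0 by omega, tensA_nonpos le_rfl]
    simp [pvB]
  | succ n ih =>
    intro x hx0 hxn
    have hpow : (0:Int) < 5 ^ (n+1) := by positivity
    have h5 : (5:Int) ^ (n + 1 + 1) = 5 * 5 ^ (n + 1) := by rw [pow_succ]; ring
    have hq : x / 5 < 5 ^ (n + 1) := by omega
    have := ih (x / 5) (by omega) hq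
    rw [tensA_eq' x hx0]
    simp only [pvB] at *
    omega

-- the descending list [pvB n, …, pvB 1] that B's reversed bases form
def chainList : Nat → List Int
  | 0 => []
  | n + 1 => pvB (n + 1) :: chainList n

theorem digit_unique {b c d t r : Int} (hb : 0 < b) (h : c * b + t = d * b + r)
    (ht0 : 0 ≤ t) (htb : t < b) (hr0 : 0 ≤ r) (hrb : r < b) : c = d ∧ t = r := by
  have hcd : c = d := by
    rcases lt_trichotomy c d with hlt | heq | hgt
    · exfalso
      have h2 : (c + 1) * b ≤ d * b := mul_le_mul_of_nonneg_right (by omega) (by omega)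
      have h3 : (c + 1) * b = c * b + b := by ring
      omega
    · exact heq
    · exfalso
      have h2 : (d + 1) * b ≤ c * b := mul_le_mul_of_nonneg_right (by omega) (by omega)
      have h3 : (d + 1) * b = d * b + b := by ring
      omega
  subst hcd
  omega

theorem digit_split (n : Nat) (x : Int) (hx0 : 0 ≤ x) (hxn : x < 5 ^ (n + 2)) :
    ∃ c x' : Int, 0 ≤ c ∧ c ≤ 4 ∧ 0 ≤ x' ∧ x' < 5 ^ (n + 1) ∧
      x = c * 5 ^ (n + 1) + x' ∧ tensA x = c * pvB (n + 1) + tensA x' := by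
  have hp : (0:Int) < 5 ^ (n + 1) := by positivity
  have hp2 : (5:Int) ^ (n + 2) = 5 * 5 ^ (n + 1) := by ring
  have hsplit := Int.ediv_add_emod x (5 ^ (n + 1))
  have hm0 : 0 ≤ x % 5 ^ (n + 1) := Int.emod_nonneg x (by omega)
  have hmlt : x % 5 ^ (n + 1) < 5 ^ (n + 1) := Int.emod_lt_of_pos x hp
  have hc0 : 0 ≤ x / 5 ^ (n + 1) := Int.ediv_nonneg hx0 (by omega)
  have hc4 : x / 5 ^ (n + 1) ≤ 4 := by
    by_contra hc
    push_neg at hc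
    have h5 : 5 ^ (n + 1) * 5 ≤ 5 ^ (n + 1) * (x / 5 ^ (n + 1)) :=
      mul_le_mul_of_nonneg_left (by omega) (by omega)
    omega
  have hxeq : x = x / 5 ^ (n + 1) * 5 ^ (n + 1) + x % 5 ^ (n + 1) := by
    rw [mul_comm]; omega
  refine ⟨_, _, hc0, hc4, hm0, hmlt, hxeq, ?_⟩
  calc tensA x = tensA (x / 5 ^ (n + 1) * 5 ^ (n + 1) + x % 5 ^ (n + 1)) := by rw [← hxeq]
    _ = _ := tensA_add (n + 1) _ _ hc0 hc4 hm0 hmlt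

-- greedy success on the chain = rem is the trailing-zero count of some x < 5^(n+1)
theorem greedy_iff (n : Nat) : ∀ rem : Int, 0 ≤ rem → rem ≤ 5 * pvB n →
    (greedyB rem (chainList n) = some 0 ↔
      ∃ x : Int, 0 ≤ x ∧ x < 5 ^ (n + 1) ∧ tensA x = rem) := by
  induction n with
  | zero =>
    intro rem h0 h1
    have hrem : rem = 0 := by simp [pvB] at h1; omega
    subst hrem
    simp only [chainList, greedyB]
    constructor
    · intro _; exact ⟨0, le_rfl, by positivity, tensA_nonpos le_rfl⟩
    · intro _; trivial
  | succ n ih =>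
    intro rem h0 h1
    have hb : 0 < pvB (n + 1) := pvB_pos n
    have hbs : pvB (n + 1) = 5 * pvB n + 1 := pvB_succ n
    obtain ⟨d, hd⟩ : ∃ d, d = rem / pvB (n + 1) := ⟨_, rfl⟩
    obtain ⟨r, hr⟩ : ∃ r, r = rem % pvB (n + 1) := ⟨_, rfl⟩
    have hcons : greedyB rem (chainList (n + 1)) =
        if 4 < d then none else greedyB r (chainList n) := by
      show (if 4 < PySem.Int.floordiv rem (pvB (n + 1)) then none
            else greedyB (PySem.Int.mod rem (pvB (n + 1))) (chainList n)) = _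
      rw [PySem.Int.floordiv_eq_ediv_of_pos hb, PySem.Int.mod_eq_emod_of_pos hb, ← hd, ← hr]
    rw [hcons]
    have hdecomp : d * pvB (n + 1) + r = rem := by
      have h := Int.ediv_add_emod rem (pvB (n + 1))
      rw [hd, hr, mul_comm]
      omega
    have hr0 : 0 ≤ r := hr ▸ Int.emod_nonneg rem (by omega)
    have hrb : r < pvB (n + 1) := hr ▸ Int.emod_lt_of_pos rem hb
    have hd0 : 0 ≤ d := hd ▸ Int.ediv_nonneg h0 (by omega)
    have hp2 : (5:Int) ^ (n + 2) = 5 * 5 ^ (n + 1) := by ring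
    by_cases hgt : 4 < d
    · rw [if_pos hgt]
      constructor
      · intro hcontra; exact absurd hcontra (by simp)
      · rintro ⟨x, hx0, hxn, hxt⟩
        exfalso
        obtain ⟨c, x', hc0, hc4, hx'0, hx'n, hxeq, hxt'⟩ := digit_split n x hx0 hxn
        have hbnd := tensA_bound n x' hx'0 hx'n
        have htn := tensA_nonneg x'
        rw [hxt'] at hxt
        have h5 : 5 * pvB (n + 1) ≤ d * pvB (n + 1) :=
          mul_le_mul_of_nonneg_right (by omega) (by omega)
        have hcB : c * pvB (n + 1) ≤ 4 * pvB (n + 1) :=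
          mul_le_mul_of_nonneg_right hc4 (by omega)
        omega
    · rw [if_neg hgt]
      have hrle : r ≤ 5 * pvB n := by omega
      rw [ih r hr0 hrle]
      constructor
      · rintro ⟨x', hx'0, hx'n, hx't⟩
        have hd4 : d * 5 ^ (n + 1) ≤ 4 * 5 ^ (n + 1) :=
          mul_le_mul_of_nonneg_right (by omega) (by positivity)
        have hdnn : 0 ≤ d * 5 ^ (n + 1) := mul_nonneg hd0 (by positivity)
        refine ⟨d * 5 ^ (n + 1) + x', by omega, by omega, ?_⟩
        rw [tensA_add (n + 1) d x' hd0 (by omega) hx'0 hx'n, hx't]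
        omega
      · rintro ⟨x, hx0, hxn, hxt⟩
        obtain ⟨c, x', hc0, hc4, hx'0, hx'n, hxeq, hxt'⟩ := digit_split n x hx0 hxn
        have hbnd := tensA_bound n x' hx'0 hx'n
        have htn := tensA_nonneg x'
        rw [hxt'] at hxt
        obtain ⟨-, hteq⟩ := digit_unique hb (hxt.trans hdecomp.symm) htn (by omega) hr0 hrb
        exact ⟨x', hx'0, hx'n, hteq⟩

-- the ascending list basesB produces
def listUp : Nat → Nat → List Int
  | _, 0 => []
  | j, m + 1 => pvB j :: listUp (j + 1) m

theorem basesB_empty {k b : Int} (h : ¬ (1 ≤ b ∧ b ≤ k)) : basesB k b = [] := by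
  rw [basesB.eq_def]; simp [h]

theorem basesB_cons {k b : Int} (h : 1 ≤ b ∧ b ≤ k) : basesB k b = b :: basesB k (5 * b + 1) := by
  rw [basesB.eq_def]; simp [h]

theorem basesB_up (k : Int) : ∀ (m j : Nat), 1 ≤ j → pvB (j + m) ≤ k →
    k < pvB (j + m + 1) → basesB k (pvB j) = listUp j (m + 1) := by
  intro m
  induction m with
  | zero =>
    intro j hj hlo hhi
    have h1 : (1:Int) ≤ pvB j := by
      have := pvB_mono (show 1 ≤ j from hj)
      simpa [pvB] using this
    rw [basesB_cons ⟨h1, by simpa using hlo⟩, ← pvB_succ j,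
        basesB_empty (by simp at hhi ⊢; omega)]
    simp [listUp]
  | succ m ih =>
    intro j hj hlo hhi
    have h1 : (1:Int) ≤ pvB j := by
      have := pvB_mono (show 1 ≤ j from hj)
      simpa [pvB] using this
    have hjk : pvB j ≤ k := le_trans (pvB_mono (by omega)) hlo
    have e1 : j + 1 + m = j + (m + 1) := by omega
    have e2 : j + 1 + m + 1 = j + (m + 1) + 1 := by omega
    rw [basesB_cons ⟨h1, hjk⟩, ← pvB_succ j, ih (j + 1) (by omega) (by rw [e1]; exact hlo)
        (by rw [e2]; exact hhi)]
    rfl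

theorem listUp_snoc (m : Nat) : ∀ j, listUp j (m + 1) = listUp j m ++ [pvB (j + m)] := by
  induction m with
  | zero => intro j; simp [listUp]
  | succ m ih =>
    intro j
    have e : j + 1 + m = j + (m + 1) := by omega
    rw [listUp, ih (j + 1), e, listUp]
    simp

theorem listUp_reverse (n : Nat) : (listUp 1 n).reverse = chainList n := by
  induction n with
  | zero => simp [listUp, chainList]
  | succ n ih =>
    rw [listUp_snoc, List.reverse_append, ih]
    simp [chainList]
    congr 1
    omega

theorem exists_level (k : Int) (hk : 1 ≤ k) :
    ∃ n : Nat, pvB (n + 1) ≤ k ∧ k < pvB (n + 2) := by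
  by_contra h
  push_neg at h
  have hall : ∀ n : Nat, pvB (n + 1) ≤ k := by
    intro n
    induction n with
    | zero => simpa [pvB] using hk
    | succ n ih => exact h n ih
  have h1 := hall k.toNat
  have h2 := pvB_ge (k.toNat + 1)
  omega

theorem bsearch_spec (k : Int) : ∀ (m : Nat) (l r : Int), (r - l).toNat ≤ m → l ≤ r →
    (∀ x, x < l → tensA x < k) → k ≤ tensA r →
    (∀ x, x < bsearchA k l r → tensA x < k) ∧ k ≤ tensA (bsearchA k l r) := by
  intro m
  induction m with
  | zero =>
    intro l r hm hlr h1 h2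
    have heq : l = r := by omega
    subst heq
    rw [bsearchA.eq_def]
    simp only [lt_irrefl, dite_false]
    exact ⟨h1, h2⟩
  | succ m ih =>
    intro l r hm hlr h1 h2
    by_cases hlt : l < r
    · have hmid : PySem.Int.floordiv (l + r) 2 = (l + r) / 2 :=
        PySem.Int.floordiv_eq_ediv_of_pos (by norm_num)
      have hcons : bsearchA k l r = if tensA ((l + r) / 2) < k
          then bsearchA k ((l + r) / 2 + 1) r
          else bsearchA k l ((l + r) / 2) := by
        rw [bsearchA.eq_def]
        simp only [hlt, dite_true, hmid]
      rw [hcons]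
      have hlm : l ≤ (l + r) / 2 ∧ (l + r) / 2 < r := by omega
      by_cases ht : tensA ((l + r) / 2) < k
      · rw [if_pos ht]
        exact ih ((l + r) / 2 + 1) r (by omega) (by omega)
          (fun x hx => lt_of_le_of_lt (tensA_mono (by omega)) ht) h2
      · rw [if_neg ht]
        exact ih l ((l + r) / 2) (by omega) (by omega) h1 (by omega)
    · have heq : l = r := by omega
      subst heq
      rw [bsearchA.eq_def]
      simp only [lt_irrefl, dite_false]
      exact ⟨h1, h2⟩

-- ===== VERDICT (by name: the statement is the Claim_ definition above) =====
theorem preimageSizeFZF_spec : Claim_equal_preimageSizeFZF := by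
  intro k _hdom
  unfold Spec_preimageSizeFZF
  rcases lt_trichotomy k 0 with hneg | hzero | hpos
  · have hA : preimageSizeFZF k = 0 := by
      unfold preimageSizeFZF
      rw [if_neg (by omega)]
      have hz : bsearchA k 0 (10 * k) = 0 := by
        rw [bsearchA.eq_def]
        simp [show ¬ ((0:Int) < 10 * k) by omega]
      show (5 * if tensA (bsearchA k 0 (10 * k)) = k then 1 else 0) = (0:Int)
      rw [hz, tensA_nonpos le_rfl, if_neg (by omega)]
      ring
    have hB : preimageSizeFZF_alt k = 0 := by
      unfold preimageSizeFZF_alt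
      rw [if_pos hneg]
    rw [hA, hB]
  · subst hzero
    have hA : preimageSizeFZF 0 = 5 := by unfold preimageSizeFZF; simp
    have hB : preimageSizeFZF_alt 0 = 5 := by
      unfold preimageSizeFZF_alt
      rw [if_neg (by omega), basesB_empty (by omega)]
      simp [greedyB]
    rw [hA, hB]
  · obtain ⟨n, hn1, hn2⟩ := exists_level k (by omega)
    have hlist : (basesB k 1).reverse = chainList (n + 1) := by
      have hpv1 : pvB 1 = 1 := by simp [pvB]
      have h1 : basesB k (pvB 1) = listUp 1 (n + 1) :=
        basesB_up k n 1 le_rfl (by rw [show 1 + n = n + 1 by omega]; exact hn1)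
          (by rw [show 1 + n + 1 = n + 2 by omega]; exact hn2)
      rw [← hpv1, h1, listUp_reverse]
    have h2k : (10 * k) / 5 = 2 * k := by omega
    have htens10 : k ≤ tensA (10 * k) := by
      rw [tensA_eq' _ (by omega), h2k]
      have := tensA_nonneg (2 * k)
      omega
    obtain ⟨H1, H2⟩ := bsearch_spec k (10 * k - 0).toNat 0 (10 * k) le_rfl (by omega)
      (fun x hx => by rw [tensA_nonpos (by omega)]; omega) htens10
    have hA : preimageSizeFZF k = if tensA (bsearchA k 0 (10 * k)) = k then 5 else 0 := by
      unfold preimageSizeFZF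
      rw [if_neg (by omega)]
      show (5 * if tensA (bsearchA k 0 (10 * k)) = k then 1 else 0) = _
      split_ifs <;> ring
    have hB : preimageSizeFZF_alt k =
        if greedyB k (chainList (n + 1)) = some 0 then 5 else 0 := by
      unfold preimageSizeFZF_alt
      rw [if_neg (by omega), hlist]
      rcases hopt : greedyB k (chainList (n + 1)) with _ | rem
      · simp
      · simp
    have hgiff := greedy_iff (n + 1) k (by omega) (by rw [pvB_succ] at hn2; omega)
    rw [hA, hB]
    by_cases hc : tensA (bsearchA k 0 (10 * k)) = k
    · rw [if_pos hc, if_pos ?hg]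
      case hg =>
        apply hgiff.mpr
        have hl0 : 0 ≤ bsearchA k 0 (10 * k) := by
          by_contra hcb
          push_neg at hcb
          rw [tensA_nonpos (by omega)] at hc
          omega
        have hlb : bsearchA k 0 (10 * k) < 5 ^ (n + 2) := by
          by_contra hcb
          push_neg at hcb
          have := tensA_mono hcb
          rw [tensA_pow] at this
          omega
        exact ⟨_, hl0, hlb, hc⟩
    · rw [if_neg hc, if_neg ?hg]
      case hg =>
        intro hg
        obtain ⟨x, hx0, hxn, hxt⟩ := hgiff.mp hg
        have hxge : ¬ (x < bsearchA k 0 (10 * k)) := fun hcb => by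
          have := H1 x hcb
          omega
        push_neg at hxge
        have := tensA_mono hxge
        omega
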